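-- pv_equiv track=rewrite | github.com/ricky0123/vocoder | vocoder/token_encoding.py | squash_str
-- ===== SOURCE A (Python) =====
-- def squash_str(s: str):
--     deduplicated_chars = list[str]()
--     last_char = ""
--     for char in s:
--         if char != last_char:
--             deduplicated_chars.append(char)
--         last_char = char
--     return "".join(c for c in deduplicated_chars if c != ".")
-- ===== SOURCE B (Python) =====
-- def squash_str(s: str):
--     # pair each char with its successor: a char survives iff it ends a run
--     # (differs from the next char) and is not a dot; the final char always ends a run
--     if not s:
--         return ""
--     kept = [a for a, b in zip(s, s[1:]) if a != b and a != "."]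
--     if s[-1] != ".":
--         kept.append(s[-1])
--     return "".join(kept)
-- ===== Notes on version B (the rewrite author's own statement) =====
-- stated objective: alternative
-- what changed: Replaces the last_char state machine plus separate dot filter with a single pairwise pass: zip the string with its own tail and keep exactly the non-dot characters that end a run (differ from their successor), handling the final character separately.
import Mathlib
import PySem

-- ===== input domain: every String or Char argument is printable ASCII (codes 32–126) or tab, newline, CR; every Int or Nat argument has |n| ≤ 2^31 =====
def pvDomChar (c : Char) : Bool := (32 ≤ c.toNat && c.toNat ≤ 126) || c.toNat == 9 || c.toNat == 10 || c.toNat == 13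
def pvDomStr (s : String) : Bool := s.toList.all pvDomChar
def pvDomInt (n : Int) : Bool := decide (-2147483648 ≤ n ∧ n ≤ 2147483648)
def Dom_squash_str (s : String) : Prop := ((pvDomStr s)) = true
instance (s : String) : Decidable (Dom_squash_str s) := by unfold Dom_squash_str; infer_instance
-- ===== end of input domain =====

-- B replaces A's last_char state machine by one pairwise zip pass (keep the non-dot chars that differ from their successor, plus a non-dot final char); alternative decomposition, same cost.

-- ===== PORT A =====
-- loop: state (deduplicated_chars, last_char); last_char = "" modelled as none (never equal to a char)
def squash_str (s : String) : String :=
  let st := s.toList.foldl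
    (fun (st : List Char × Option Char) c =>
      (if some c ≠ st.2 then st.1 ++ [c] else st.1, some c))
    ([], none)
  String.mk (st.1.filter (fun c => c != '.'))

-- ===== PORT B =====
def squash_str_alt (s : String) : String :=
  match s.toList with
  | [] => ""   -- if not s: return ""
  | c :: cs =>
    let kept := (((c :: cs).zip cs).filter (fun p => p.1 != p.2 && p.1 != '.')).map Prod.fst
    let kept := if (c :: cs).getLast! != '.' then kept ++ [(c :: cs).getLast!] else kept
    String.mk kept

-- ===== PRECONDITION & SPEC =====
def Spec_squash_str (s : String) (out : String) : Prop := out = squash_str_alt s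
instance (s : String) (out : String) : Decidable (Spec_squash_str s out) := by unfold Spec_squash_str; infer_instance

-- ===== CLAIM (what is proved, stated in full; the proofs are below) =====
def Claim_equal_squash_str : Prop := ∀ (s : String), Dom_squash_str s → Spec_squash_str s (squash_str s)

-- ===== LEMMAS AND PROOFS =====

-- reference dedup: collapse runs, comparing with the previous char (A's invariant)
def pvDedup (p : Option Char) : List Char → List Char
  | [] => []
  | c :: cs => (if some c ≠ p then [c] else []) ++ pvDedup (some c) cs

theorem pvFoldA (cs : List Char) (acc : List Char) (p : Option Char) :
    (cs.foldl (fun (st : List Char × Option Char) c =>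
      (if some c ≠ st.2 then st.1 ++ [c] else st.1, some c)) (acc, p)).1
    = acc ++ pvDedup p cs := by
  induction cs generalizing acc p with
  | nil => simp [pvDedup]
  | cons c cs ih =>
    simp only [List.foldl_cons, pvDedup]
    rw [ih]
    by_cases h : some c ≠ p <;> simp [h]

theorem pvKey (cs : List Char) (c : Char) :
    (((c :: cs).zip cs).filter (fun p => p.1 != p.2 && p.1 != '.')).map Prod.fst
      ++ (if (c :: cs).getLast! != '.' then [(c :: cs).getLast!] else [])
    = (if c ≠ '.' then [c] else []) ++ (pvDedup (some c) cs).filter (fun x => x != '.') := by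
  induction cs generalizing c with
  | nil =>
    by_cases h : c = '.' <;> simp [pvDedup, List.getLast!, h]
  | cons d ds ih =>
    have hlast : (c :: d :: ds).getLast! = (d :: ds).getLast! := by
      simp [List.getLast!]
    have ihd := ih d
    simp only [List.zip_cons_cons, List.filter_cons, hlast, pvDedup]
    by_cases hcd : c = d
    · subst hcd
      rw [if_neg (by simp : ¬ some c ≠ some c), List.nil_append,
          if_neg (by simp : ¬ ((c != c && c != '.') = true))]
      exact ihd
    · rw [if_pos (by simp [Ne.symm hcd] : some d ≠ some c), List.filter_append]
      have hsing : List.filter (fun x => x != '.') [d]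
          = if d ≠ '.' then [d] else [] := by
        by_cases hd : d = '.' <;> simp [hd]
      by_cases hc : c = '.'
      · subst hc
        rw [if_neg (by simp : ¬ (('.' != d && '.' != '.') = true)),
            if_neg (by simp : ¬ ('.' : Char) ≠ '.'), List.nil_append, ihd, hsing]
      · rw [if_pos (by simp [hcd, hc] : (c != d && c != '.') = true), List.map_cons,
            if_pos hc, List.cons_append, ihd, hsing, List.singleton_append]

-- ===== VERDICT (by name: the statement is the Claim_ definition above) =====
theorem squash_str_spec : Claim_equal_squash_str := by
  intro s _
  unfold Spec_squash_str squash_str squash_str_alt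
  cases h : s.toList with
  | nil => simp; rfl
  | cons c cs =>
    simp only []
    rw [pvFoldA]
    have hd : pvDedup none (c :: cs) = c :: pvDedup (some c) cs := by
      simp [pvDedup]
    rw [hd]
    have hb := pvKey cs c
    by_cases hl : (((c :: cs).getLast! != '.') = true)
    · simp only [hl, if_true] at hb ⊢
      rw [hb]
      by_cases hc : c = '.' <;> simp [hc]
    · simp only [Bool.not_eq_true] at hl
      simp only [hl, Bool.false_eq_true, if_false, List.append_nil] at hb ⊢
      rw [hb]
      by_cases hc : c = '.' <;> simp [hc]
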